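-- pv_equiv track=rewrite | github.com/nonamed19/Problem-Solving | SWEA/SWEA_5203.py | baby_jin
-- ===== SOURCE A (Python) =====
-- def baby_jin(lst):
--     cnt = 0
--     # triplet
--     for i in range(10):
--         if lst.count(i) >= 3:
--             cnt += 1
--
--     # run 판별을 위해 중복이 없는 임시 list 생성
--     lst_temp = []
--     for num in lst:
--         if num not in lst_temp:
--             lst_temp.append(num)
--
--     # run
--     consecutive = 1
--     for i in range(len(lst_temp)-1):
--         if lst_temp[i+1] - lst_temp[i] == 1:
--             consecutive += 1
--             if consecutive >= 3:
--                 cnt += 1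
--         else:
--             consecutive = 1
--
--     return cnt
-- ===== SOURCE B (Python) =====
-- def baby_jin(lst):
--     # one-pass frequency table instead of ten .count scans
--     freq = {}
--     for x in lst:
--         freq[x] = freq.get(x, 0) + 1
--     cnt = 0
--     for d in range(10):
--         if freq.get(d, 0) >= 3:
--             cnt += 1
--
--     # first-occurrence dedup via dict, then group into maximal consecutive segments
--     uniq = list(dict.fromkeys(lst))
--     segments = []
--     for x in uniq:
--         if segments and x == segments[-1][-1] + 1:
--             segments[-1].append(x)
--         else:
--             segments.append([x])
--     for seg in segments:
--         cnt += max(len(seg) - 2, 0)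
--     return cnt
-- ===== Notes on version B (the rewrite author's own statement) =====
-- stated objective: faster
-- what changed: Triplets are counted from a frequency dict built in one pass instead of ten list.count scans, and runs are counted by partitioning the dedup'd hand into maximal consecutive segments and summing max(len-2,0) per segment instead of a mid-loop streak accumulator; the dedup uses dict.fromkeys instead of a quadratic membership loop.
import Mathlib
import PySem

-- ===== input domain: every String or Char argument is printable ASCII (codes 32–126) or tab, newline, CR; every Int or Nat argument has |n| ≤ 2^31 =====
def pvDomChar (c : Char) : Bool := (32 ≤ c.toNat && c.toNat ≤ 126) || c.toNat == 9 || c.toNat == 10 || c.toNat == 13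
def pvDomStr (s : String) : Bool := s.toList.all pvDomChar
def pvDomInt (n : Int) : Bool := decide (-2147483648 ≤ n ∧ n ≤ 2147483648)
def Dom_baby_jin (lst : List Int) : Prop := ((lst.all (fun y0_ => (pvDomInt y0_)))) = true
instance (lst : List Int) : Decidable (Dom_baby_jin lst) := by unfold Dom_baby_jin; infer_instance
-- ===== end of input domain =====

-- B replaces A's ten .count scans by a one-pass frequency dict and A's mid-loop streak
-- accumulator by grouping the deduped hand into maximal consecutive segments, each
-- contributing max(len-2, 0).

-- ===== PORT A =====
def baby_jin (lst : List Int) : Int :=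
  -- triplet: for i in range(10): if lst.count(i) >= 3: cnt += 1
  let cnt : Int := (PySem.List.pyRange 0 10 1).foldl
    (fun cnt i => if 3 ≤ lst.count i then cnt + 1 else cnt) 0
  -- lst_temp: if num not in lst_temp: lst_temp.append(num)
  let temp := lst.foldl (fun acc num => if num ∉ acc then acc ++ [num] else acc) ([] : List Int)
  -- run loop over i in range(len(lst_temp)-1), state (consecutive, cnt)
  let s := (PySem.List.pyRange 0 ((temp.length : Int) - 1) 1).foldl
    (fun (s : Int × Int) i =>
      if PySem.List.pyGetD temp (i + 1) 0 - PySem.List.pyGetD temp i 0 = 1 then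
        let c := s.1 + 1
        (c, if 3 ≤ c then s.2 + 1 else s.2)
      else (1, s.2)) ((1 : Int), cnt)
  s.2

-- ===== PORT B =====
def baby_jin_alt (lst : List Int) : Int :=
  -- freq[x] = freq.get(x, 0) + 1
  let freq := lst.foldl (fun d x => d.insert x (d.getD x 0 + 1)) (PySem.Dict.empty : PySem.Dict Int Int)
  let cnt : Int := (PySem.List.pyRange 0 10 1).foldl
    (fun cnt d => if 3 ≤ freq.getD d 0 then cnt + 1 else cnt) 0
  -- uniq = list(dict.fromkeys(lst))
  let uniq := PySem.List.dedup lst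
  -- group into maximal consecutive segments (segments[-1].append(x) ported as dropLast ++ [last ++ [x]])
  let segments := uniq.foldl
    (fun (segs : List (List Int)) x =>
      match segs.getLast? with
      | some seg =>
          if x = PySem.List.pyGetD seg (-1) 0 + 1 then segs.dropLast ++ [seg ++ [x]]
          else segs ++ [[x]]
      | none => segs ++ [[x]]) []
  segments.foldl (fun cnt seg => cnt + max ((seg.length : Int) - 2) 0) cnt

-- ===== PRECONDITION & SPEC =====
def Spec_baby_jin (lst : List Int) (out : Int) : Prop := out = baby_jin_alt lst
instance (lst : List Int) (out : Int) : Decidable (Spec_baby_jin lst out) := by unfold Spec_baby_jin; infer_instance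

-- ===== CLAIM (what is proved, stated in full; the proofs are below) =====
def Claim_equal_baby_jin : Prop := ∀ (lst : List Int), Dom_baby_jin lst → Spec_baby_jin lst (baby_jin lst)

-- ===== LEMMAS AND PROOFS =====

/-- A's run loop, folded over adjacent pairs (prev :: rest). -/
def pvPairFold {σ : Type} (g : σ → Int → Int → σ) : σ → List Int → σ
  | s, [] => s
  | s, [_] => s
  | s, x :: y :: r => pvPairFold g (g s x y) (y :: r)

/-- B's per-segment contribution. -/
def pvSegVal (seg : List Int) : Int := max ((seg.length : Int) - 2) 0

/-- B's step building the segment list. -/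
def pvStep (segs : List (List Int)) (x : Int) : List (List Int) :=
  match segs.getLast? with
  | some seg =>
      if x = PySem.List.pyGetD seg (-1) 0 + 1 then segs.dropLast ++ [seg ++ [x]]
      else segs ++ [[x]]
  | none => segs ++ [[x]]

/-- A's run-loop body. -/
def pvGA (s : Int × Int) (x y : Int) : Int × Int :=
  if y - x = 1 then
    let c := s.1 + 1
    (c, if 3 ≤ c then s.2 + 1 else s.2)
  else (1, s.2)

def pvS (segs : List (List Int)) : Int := (segs.map pvSegVal).sum

theorem pvS_concat (pre : List (List Int)) (seg : List Int) :
    pvS (pre ++ [seg]) = pvS pre + pvSegVal seg := by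
  simp [pvS]

theorem pv_idx_to_pair (t : List Int) (g : (Int × Int) → Int → Int → Int × Int) (init : Int × Int) :
    (List.range (t.length - 1)).foldl
      (fun s k => g s (t.getD k 0) (t.getD (k + 1) 0)) init = pvPairFold g init t := by
  induction t generalizing init with
  | nil => simp [pvPairFold]
  | cons x t ih =>
    match t with
    | [] => simp [pvPairFold]
    | y :: r =>
      have hlen : (x :: y :: r).length - 1 = r.length + 1 := by simp
      rw [hlen, List.range_succ_eq_map, List.foldl_cons, List.foldl_map]
      simp only [List.getD_cons_zero, List.getD_cons_succ]
      have := ih (init := g init x y)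
      simpa [pvPairFold] using this

theorem pv_key : ∀ (rest : List Int) (pre : List (List Int)) (seg : List Int)
    (h : seg ≠ []) (n : Int),
    (pvPairFold pvGA ((seg.length : Int), n) (seg.getLast h :: rest)).2
      + pvS pre + pvSegVal seg
    = n + pvS (rest.foldl pvStep (pre ++ [seg])) := by
  intro rest
  induction rest with
  | nil =>
    intro pre seg h n
    simp [pvPairFold, pvS_concat]; ring
  | cons x rest ih =>
    intro pre seg h n
    have hlen : 0 < seg.length := List.length_pos_of_ne_nil h
    by_cases hc : x - seg.getLast h = 1
    · -- extend the current segment / streak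
      have hstep : pvStep (pre ++ [seg]) x = pre ++ [seg ++ [x]] := by
        simp [pvStep, PySem.List.pyGetD_neg_one seg 0 h,
          show x = seg.getLast h + 1 by omega]
      have hne : seg ++ [x] ≠ [] := by simp
      have hlast : (seg ++ [x]).getLast hne = x := List.getLast_concat ..
      have hga : pvGA ((seg.length : Int), n) (seg.getLast h) x
          = (((seg ++ [x]).length : Int), if 3 ≤ (seg.length : Int) + 1 then n + 1 else n) := by
        simp [pvGA, hc]
      have := ih pre (seg ++ [x]) hne (if 3 ≤ (seg.length : Int) + 1 then n + 1 else n)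
      rw [hlast] at this
      have harith : (if 3 ≤ (seg.length : Int) + 1 then n + 1 else n) + pvSegVal seg
          = n + pvSegVal (seg ++ [x]) := by
        simp only [pvSegVal, List.length_append, List.length_singleton]
        push_cast
        split_ifs <;> omega
      rw [show ((x :: rest).foldl pvStep (pre ++ [seg]))
            = rest.foldl pvStep (pre ++ [seg ++ [x]]) from by rw [List.foldl_cons, hstep]]
      rw [show pvPairFold pvGA ((seg.length : Int), n) (seg.getLast h :: x :: rest)
            = pvPairFold pvGA (((seg ++ [x]).length : Int),
                if 3 ≤ (seg.length : Int) + 1 then n + 1 else n) (x :: rest) from by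
          rw [pvPairFold, hga]]
      omega
    · -- start a new segment / streak resets
      have hstep : pvStep (pre ++ [seg]) x = (pre ++ [seg]) ++ [[x]] := by
        simp [pvStep, PySem.List.pyGetD_neg_one seg 0 h]
        intro he; exfalso; apply hc; omega
      have hne : ([x] : List Int) ≠ [] := by simp
      have hga : pvGA ((seg.length : Int), n) (seg.getLast h) x = (1, n) := by
        simp [pvGA, hc]
      have := ih (pre ++ [seg]) [x] hne n
      simp only [List.getLast_singleton, List.length_singleton, Nat.cast_one] at this
      have hsv : pvSegVal [x] = 0 := by simp [pvSegVal]
      rw [pvS_concat] at this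
      rw [show ((x :: rest).foldl pvStep (pre ++ [seg]))
            = rest.foldl pvStep ((pre ++ [seg]) ++ [[x]]) from by rw [List.foldl_cons, hstep]]
      rw [show pvPairFold pvGA ((seg.length : Int), n) (seg.getLast h :: x :: rest)
            = pvPairFold pvGA (1, n) (x :: rest) from by rw [pvPairFold, hga]]
      omega

theorem pv_temp_eq_dedup (lst : List Int) :
    lst.foldl (fun acc num => if num ∉ acc then acc ++ [num] else acc) ([] : List Int)
      = PySem.List.dedup lst := by
  rw [PySem.List.dedup_eq_ofList, PySem.Set.ofList_eq_foldl]
  apply PySem.List.foldl_congr_mem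
  intro acc x _
  simp only [PySem.Set.add]
  by_cases h : x ∈ acc <;> simp [h]

theorem pv_triplet_eq (lst : List Int) :
    (PySem.List.pyRange 0 10 1).foldl
      (fun cnt i => if 3 ≤ lst.count i then cnt + 1 else cnt) (0 : Int)
    = (PySem.List.pyRange 0 10 1).foldl
      (fun cnt d => if 3 ≤ (lst.foldl (fun d x => d.insert x (d.getD x 0 + 1))
          (PySem.Dict.empty : PySem.Dict Int Int)).getD d 0 then cnt + 1 else cnt) (0 : Int) := by
  apply PySem.List.foldl_congr_mem
  intro acc x _
  rw [PySem.Dict.getD_foldl_insert_add_one]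
  simp only [PySem.Dict.getD_empty, zero_add]
  by_cases h : 3 ≤ lst.count x
  · rw [if_pos h, if_pos (by exact_mod_cast h)]
  · rw [if_neg h, if_neg (by exact_mod_cast h)]

theorem pv_run_eq (temp : List Int) (cnt : Int) :
    ((PySem.List.pyRange 0 ((temp.length : Int) - 1) 1).foldl
      (fun (s : Int × Int) i =>
        if PySem.List.pyGetD temp (i + 1) 0 - PySem.List.pyGetD temp i 0 = 1 then
          let c := s.1 + 1
          (c, if 3 ≤ c then s.2 + 1 else s.2)
        else (1, s.2)) ((1 : Int), cnt)).2
    = (temp.foldl pvStep []).foldl (fun cnt seg => cnt + pvSegVal seg) cnt := by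
  have hidx : (PySem.List.pyRange 0 ((temp.length : Int) - 1) 1).foldl
      (fun (s : Int × Int) i =>
        if PySem.List.pyGetD temp (i + 1) 0 - PySem.List.pyGetD temp i 0 = 1 then
          let c := s.1 + 1
          (c, if 3 ≤ c then s.2 + 1 else s.2)
        else (1, s.2)) ((1 : Int), cnt)
      = pvPairFold pvGA (1, cnt) temp := by
    rw [PySem.List.pyRange_one, List.foldl_map]
    have htn : (((temp.length : Int) - 1) - 0).toNat = temp.length - 1 := by omega
    rw [htn]
    rw [← pv_idx_to_pair temp pvGA (1, cnt)]
    apply PySem.List.foldl_congr_mem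
    intro s k _
    have h1 : PySem.List.pyGetD temp ((0 : Int) + (k : Int)) 0 = temp.getD k 0 := by
      simp [PySem.List.pyGetD_natCast]
    have h2 : PySem.List.pyGetD temp ((0 : Int) + (k : Int) + 1) 0 = temp.getD (k + 1) 0 := by
      have : (0 : Int) + (k : Int) + 1 = ((k + 1 : Nat) : Int) := by push_cast; ring
      rw [this, PySem.List.pyGetD_natCast]
    rw [h1, h2, pvGA]
  rw [hidx]
  rw [PySem.List.foldl_add (g := pvSegVal)]
  match temp with
  | [] => simp [pvPairFold]
  | t :: ts =>
    have hne : ([t] : List Int) ≠ [] := by simp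
    have := pv_key ts [] [t] hne cnt
    simp only [List.getLast_singleton, List.length_singleton, Nat.cast_one, List.nil_append,
      pvS, List.map_nil, List.sum_nil] at this
    have hsv : pvSegVal [t] = 0 := by simp [pvSegVal]
    rw [hsv] at this
    have hfirst : (t :: ts).foldl pvStep [] = ts.foldl pvStep [[t]] := by
      rw [List.foldl_cons]; rfl
    rw [hfirst]
    omega

-- ===== VERDICT (by name: the statement is the Claim_ definition above) =====
theorem baby_jin_spec : Claim_equal_baby_jin := by
  intro lst _
  show baby_jin lst = baby_jin_alt lst
  unfold baby_jin baby_jin_alt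
  simp only []
  rw [pv_temp_eq_dedup, pv_triplet_eq, pv_run_eq]
  rfl
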